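-- pv_equiv track=rewrite | github.com/Mujtaba-Siddiqui/Visualization-of-Algorithm-DataStructureAndAlgorithm-DescreteMathematics-Project | VisualizationofAlgorithm.py | clrar
-- ===== SOURCE A (Python) =====
-- def clrar(n, l, mid, r):
--     clr = []
--     for i in range(n):
--         if l <= i <= r:
--             if l <= i <= mid:
--                 clr.append('yellow')
--             else:
--                 clr.append('blue')
--         else:
--             clr.append('white')
--
--     return clr
-- ===== SOURCE B (Python) =====
-- def clrar(n, l, mid, r):
--     clr = ['white'] * n
--     lo = max(l, 0)
--     hi = min(r, mid, n - 1)
--     if lo <= hi: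
--         clr[lo:hi + 1] = ['yellow'] * (hi - lo + 1)
--     lo = max(l, mid + 1, 0)
--     hi = min(r, n - 1)
--     if lo <= hi:
--         clr[lo:hi + 1] = ['blue'] * (hi - lo + 1)
--     return clr
-- ===== Notes on version B (the rewrite author's own statement) =====
-- stated objective: faster
-- what changed: Replaces the per-index membership branching loop with boundary arithmetic: build a white list once, then fill the yellow and blue contiguous blocks by two clamped slice assignments.
import Mathlib
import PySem

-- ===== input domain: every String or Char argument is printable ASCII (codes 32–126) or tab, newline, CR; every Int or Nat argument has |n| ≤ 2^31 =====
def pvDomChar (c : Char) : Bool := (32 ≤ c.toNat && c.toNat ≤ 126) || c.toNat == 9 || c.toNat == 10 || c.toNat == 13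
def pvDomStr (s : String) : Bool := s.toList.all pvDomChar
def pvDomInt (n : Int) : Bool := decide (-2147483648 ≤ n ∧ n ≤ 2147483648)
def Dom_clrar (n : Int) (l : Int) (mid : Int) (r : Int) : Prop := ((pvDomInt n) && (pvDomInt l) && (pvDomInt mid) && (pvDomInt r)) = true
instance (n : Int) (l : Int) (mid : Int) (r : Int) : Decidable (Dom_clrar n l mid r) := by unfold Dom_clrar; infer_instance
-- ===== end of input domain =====

-- B replaces A's per-index branching loop by boundary arithmetic: a white list plus two
-- clamped contiguous block fills (slice assignments) for yellow and blue (objective: faster by constant factor, measured).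

-- ===== PORT A =====
def clrar (n : Int) (l : Int) (mid : Int) (r : Int) : List String :=
  (PySem.List.pyRange 0 n 1).foldl
    (fun clr i =>
      if l ≤ i ∧ i ≤ r then
        if l ≤ i ∧ i ≤ mid then clr ++ ["yellow"] else clr ++ ["blue"]
      else clr ++ ["white"]) []

-- ===== PORT B =====
-- slice assignment clr[lo:hi+1] = ys; exact for 0 ≤ lo ≤ hi < len clr and len ys = hi-lo+1,
-- which is the only way B calls it (under its 'lo <= hi' guards with clamped bounds)
def pvFillSlice (clr : List String) (lo hi : Int) (ys : List String) : List String :=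
  clr.take lo.toNat ++ ys ++ clr.drop (hi + 1).toNat

def clrar_alt (n : Int) (l : Int) (mid : Int) (r : Int) : List String :=
  let clr := List.replicate n.toNat "white"
  let lo1 := max l 0
  let hi1 := min r (min mid (n - 1))
  let clr := if lo1 ≤ hi1 then pvFillSlice clr lo1 hi1 (List.replicate (hi1 - lo1 + 1).toNat "yellow") else clr
  let lo2 := max l (max (mid + 1) 0)
  let hi2 := min r (n - 1)
  let clr := if lo2 ≤ hi2 then pvFillSlice clr lo2 hi2 (List.replicate (hi2 - lo2 + 1).toNat "blue") else clr
  clr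

-- ===== PRECONDITION & SPEC =====
def Spec_clrar (n : Int) (l : Int) (mid : Int) (r : Int) (out : List String) : Prop := out = clrar_alt n l mid r
instance (n : Int) (l : Int) (mid : Int) (r : Int) (out : List String) : Decidable (Spec_clrar n l mid r out) := by unfold Spec_clrar; infer_instance

-- ===== CLAIM (what is proved, stated in full; the proofs are below) =====
def Claim_equal_clrar : Prop := ∀ (n : Int) (l : Int) (mid : Int) (r : Int), Dom_clrar n l mid r → Spec_clrar n l mid r (clrar n l mid r)

-- ===== LEMMAS AND PROOFS =====

-- A's append loop over range(n) is a map
theorem clrar_eq_map (n l mid r : Int) :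
    clrar n l mid r = (List.range n.toNat).map (fun (k : Nat) =>
      if l ≤ (k : Int) ∧ (k : Int) ≤ r then
        if l ≤ (k : Int) ∧ (k : Int) ≤ mid then "yellow" else "blue"
      else "white") := by
  unfold clrar
  have h : (fun (clr : List String) (i : Int) =>
      if l ≤ i ∧ i ≤ r then
        if l ≤ i ∧ i ≤ mid then clr ++ ["yellow"] else clr ++ ["blue"]
      else clr ++ ["white"]) =
      fun clr i => clr ++ [if l ≤ i ∧ i ≤ r then (if l ≤ i ∧ i ≤ mid then "yellow" else "blue") else "white"] := by
    funext clr i; split_ifs <;> rfl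
  rw [h, PySem.List.foldl_append_singleton_eq_map, PySem.List.pyRange_one, List.map_map]
  simp only [List.nil_append, Int.sub_zero]
  refine List.map_congr_left ?_
  intro a _
  show (if l ≤ 0 + (a:Int) ∧ 0 + (a:Int) ≤ r then if l ≤ 0 + (a:Int) ∧ 0 + (a:Int) ≤ mid then "yellow" else "blue" else "white") = _
  rw [zero_add]

-- an in-bounds slice-fill keeps the length
theorem pvFillSlice_length (clr : List String) (lo hi : Int) (ys : List String)
    (h0 : 0 ≤ lo) (h1 : lo ≤ hi) (h2 : hi < (clr.length : Int))
    (hys : ys.length = (hi - lo + 1).toNat) :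
    (pvFillSlice clr lo hi ys).length = clr.length := by
  unfold pvFillSlice
  simp only [List.length_append, List.length_take, List.length_drop, hys]
  omega

-- pointwise description of an in-bounds constant slice-fill
theorem pvFillSlice_getElem (clr : List String) (lo hi : Int) (c : String)
    (h0 : 0 ≤ lo) (h1 : lo ≤ hi)
    (k : Nat) (hk : k < clr.length) (hk' : k < (pvFillSlice clr lo hi (List.replicate (hi - lo + 1).toNat c)).length) :
    (pvFillSlice clr lo hi (List.replicate (hi - lo + 1).toNat c))[k]'hk' =
      if lo ≤ (k : Int) ∧ (k : Int) ≤ hi then c else clr[k]'hk := by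
  unfold pvFillSlice at *
  rcases lt_or_ge k lo.toNat with hcase | hcase
  · rw [List.getElem_append_left (by simp only [List.length_append, List.length_take, List.length_replicate]; omega)]
    rw [List.getElem_append_left (by simp only [List.length_take]; omega)]
    simp only [List.getElem_take]
    rw [if_neg (by omega)]
  · rcases lt_or_ge k (lo.toNat + (hi - lo + 1).toNat) with hcase2 | hcase2
    · rw [List.getElem_append_left (by simp only [List.length_append, List.length_take, List.length_replicate]; omega)]
      rw [List.getElem_append_right (by simp only [List.length_take]; omega)]
      simp only [List.getElem_replicate]
      rw [if_pos (by constructor <;> omega)]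
    · rw [List.getElem_append_right (by simp only [List.length_append, List.length_take, List.length_replicate]; omega)]
      simp only [List.length_append, List.length_take, List.length_replicate]
      simp only [List.getElem_drop]
      rw [if_neg (by omega)]
      congr 1
      omega

theorem clrar_eq_alt (n l mid r : Int) : clrar n l mid r = clrar_alt n l mid r := by
  rw [clrar_eq_map]
  unfold clrar_alt
  simp only []
  set lo1 := max l 0 with hlo1
  set hi1 := min r (min mid (n - 1)) with hhi1
  set lo2 := max l (max (mid + 1) 0) with hlo2
  set hi2 := min r (n - 1) with hhi2
  have hlo1' : 0 ≤ lo1 := le_max_right l 0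
  have hlo2' : 0 ≤ lo2 := le_trans (le_max_right (mid+1) 0) (le_max_right _ _)
  have hn : (List.replicate n.toNat "white").length = n.toNat := List.length_replicate
  by_cases hy : lo1 ≤ hi1 <;> by_cases hb : lo2 ≤ hi2
  all_goals simp only [hy, hb, if_pos, if_neg, not_false_iff]
  · -- both fills
    have hlen1 : (pvFillSlice (List.replicate n.toNat "white") lo1 hi1 (List.replicate (hi1 - lo1 + 1).toNat "yellow")).length = n.toNat := by
      rw [pvFillSlice_length _ _ _ _ hlo1' hy (by rw [hn]; omega) List.length_replicate, hn]
    apply List.ext_getElem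
    · rw [pvFillSlice_length _ _ _ _ hlo2' hb (by rw [hlen1]; omega) List.length_replicate, hlen1]
      simp
    · intro k hkA hkB
      simp only [List.getElem_map, List.getElem_range]
      have hkn : k < n.toNat := by simpa using hkA
      rw [pvFillSlice_getElem _ lo2 hi2 "blue" hlo2' hb k (by omega) hkB]
      rw [pvFillSlice_getElem _ lo1 hi1 "yellow" hlo1' hy k (by omega) (by omega)]
      simp only [List.getElem_replicate]
      split_ifs <;> first | rfl | omega
  · -- yellow fill only
    apply List.ext_getElem
    · rw [pvFillSlice_length _ _ _ _ hlo1' hy (by rw [hn]; omega) List.length_replicate, hn]; simp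
    · intro k hkA hkB
      simp only [List.getElem_map, List.getElem_range]
      have hkn : k < n.toNat := by simpa using hkA
      rw [pvFillSlice_getElem _ lo1 hi1 "yellow" hlo1' hy k (by omega) hkB]
      simp only [List.getElem_replicate]
      split_ifs <;> first | rfl | omega
  · -- blue fill only
    apply List.ext_getElem
    · rw [pvFillSlice_length _ _ _ _ hlo2' hb (by rw [hn]; omega) List.length_replicate, hn]; simp
    · intro k hkA hkB
      simp only [List.getElem_map, List.getElem_range]
      have hkn : k < n.toNat := by simpa using hkA
      rw [pvFillSlice_getElem _ lo2 hi2 "blue" hlo2' hb k (by omega) hkB]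
      simp only [List.getElem_replicate]
      split_ifs <;> first | rfl | omega
  · -- no fill: all white
    apply List.ext_getElem
    · simp
    · intro k hkA hkB
      simp only [List.getElem_map, List.getElem_range, List.getElem_replicate]
      have hkn : k < n.toNat := by simpa using hkA
      split_ifs <;> first | rfl | omega

-- ===== VERDICT (by name: the statement is the Claim_ definition above) =====
theorem clrar_spec : Claim_equal_clrar := by
  intro n l mid r _
  unfold Spec_clrar
  exact clrar_eq_alt n l mid r
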